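-- pv_equiv track=rewrite | github.com/makarchuk/Advent | day24/main.py | find_bridges
-- ===== SOURCE A (Python) =====
-- from copy import deepcopy
--
-- def find_bridges(end, ports, bridge):
--     bridge = deepcopy(bridge)
--     found = False
--     for i, port in enumerate(ports):
--         if port[0] == end:
--             new_bridge = deepcopy(bridge)
--             new_bridge.append(port)
--             available_ports = ports[0:i] + ports[i + 1:]
--             found = True
--             for x in find_bridges(port[1], available_ports, new_bridge):
--                 yield x
--         if port[1] == end:
--             found = True
--             new_bridge = deepcopy(bridge)
--             new_bridge.append(port)
--             available_ports = ports[0:i] + ports[i + 1:]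
--             for x in find_bridges(port[0], available_ports, new_bridge):
--                 yield x
--     if not found:
--         yield bridge
-- ===== SOURCE B (Python) =====
-- def find_bridges(end, ports, bridge):
--     # Iterative DFS with an explicit stack of (end, available_ports, bridge) frames.
--     stack = [(end, list(ports), list(bridge))]
--     while stack:
--         e, ps, br = stack.pop()
--         children = []
--         for i, p in enumerate(ps):
--             if p[0] == e or p[1] == e:
--                 avail = ps[:i] + ps[i + 1:]
--                 if p[0] == e:
--                     children.append((p[1], avail, br + [p]))
--                 if p[1] == e:
--                     children.append((p[0], avail, br + [p]))
--         if not children: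
--             yield br
--         else:
--             # push in reverse so LIFO popping visits children in order
--             stack.extend(reversed(children))
-- ===== Notes on version B (the rewrite author's own statement) =====
-- stated objective: alternative
-- what changed: The recursive generator is replaced by an iterative DFS over an explicit stack of (end, available_ports, bridge) frames: children are collected per frame and pushed in reverse so LIFO popping reproduces the recursion's exact yield order.
import Mathlib
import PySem

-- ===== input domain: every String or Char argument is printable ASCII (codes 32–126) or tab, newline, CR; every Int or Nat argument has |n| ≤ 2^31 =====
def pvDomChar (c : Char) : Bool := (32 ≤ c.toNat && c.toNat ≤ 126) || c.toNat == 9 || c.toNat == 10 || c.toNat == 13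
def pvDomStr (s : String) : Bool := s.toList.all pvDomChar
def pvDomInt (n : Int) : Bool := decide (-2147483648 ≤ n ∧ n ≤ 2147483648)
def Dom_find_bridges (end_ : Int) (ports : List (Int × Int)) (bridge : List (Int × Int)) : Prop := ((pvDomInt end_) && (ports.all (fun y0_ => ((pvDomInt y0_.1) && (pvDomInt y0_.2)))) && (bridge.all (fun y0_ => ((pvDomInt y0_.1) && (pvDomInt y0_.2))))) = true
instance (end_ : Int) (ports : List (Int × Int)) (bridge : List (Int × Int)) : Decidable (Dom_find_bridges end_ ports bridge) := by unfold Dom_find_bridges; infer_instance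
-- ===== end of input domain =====

-- B replaces A's recursive generator by an explicit-stack iterative DFS yielding the
-- same bridges in the same order (alternative decomposition, no speed claim).
-- ===== PORT A =====
-- A is a recursive generator: for each port matching `end_` in either position it
-- recurses on the remaining ports; if no port matched it yields the bridge.
-- The enumerate/slice loop is transliterated as fbLoop over (before, rest) with
-- available_ports = before ++ after (= ports[0:i] + ports[i+1:]).
mutual
def find_bridges (end_ : Int) (ports : List (Int × Int)) (bridge : List (Int × Int)) : List (List (Int × Int)) :=
  let r := fbLoop end_ bridge [] ports
  if r.1 then r.2 else [bridge]
termination_by (2 * ports.length + 1, 0)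

def fbLoop (end_ : Int) (bridge : List (Int × Int)) (before rest : List (Int × Int)) : Bool × List (List (Int × Int)) :=
  match rest with
  | [] => (false, [])
  | p :: after =>
    let avail := before ++ after
    let r1 : Bool × List (List (Int × Int)) :=
      if p.1 == end_ then (true, find_bridges p.2 avail (bridge ++ [p])) else (false, [])
    let r2 : Bool × List (List (Int × Int)) :=
      if p.2 == end_ then (true, find_bridges p.1 avail (bridge ++ [p])) else (false, [])
    let rr := fbLoop end_ bridge (before ++ [p]) after
    (r1.1 || r2.1 || rr.1, r1.2 ++ r2.2 ++ rr.2)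
termination_by (2 * (before.length + rest.length), rest.length)
decreasing_by all_goals simp [List.length_append]; omega
end

-- ===== PORT B =====
-- B: explicit-stack iterative DFS; children of a frame are collected in order and
-- pushed reversed (head of a Lean list = top of the Python stack, so pushing
-- reversed(children) makes the new stack `children ++ rest`).
def mkChildren (e : Int) (br : List (Int × Int)) (before rest : List (Int × Int)) :
    List (Int × List (Int × Int) × List (Int × Int)) :=
  match rest with
  | [] => []
  | p :: after =>
    let avail := before ++ after
    ((if p.1 == e then [(p.2, avail, br ++ [p])] else []) ++
     (if p.2 == e then [(p.1, avail, br ++ [p])] else [])) ++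
    mkChildren e br (before ++ [p]) after

-- termination measure for the stack loop
def gMeas : Nat → Nat
  | 0 => 1
  | n + 1 => 2 * (n + 1) * gMeas n + 1

def stackMeas (s : List (Int × List (Int × Int) × List (Int × Int))) : Nat :=
  (s.map (fun f => gMeas f.2.1.length)).sum

theorem gMeas_pos : ∀ n, 0 < gMeas n := by
  intro n; cases n <;> simp [gMeas]

theorem stackMeas_append (a b : List (Int × List (Int × Int) × List (Int × Int))) :
    stackMeas (a ++ b) = stackMeas a + stackMeas b := by
  simp [stackMeas]

theorem mkChildren_meas (e : Int) (br : List (Int × Int)) :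
    ∀ (rest before : List (Int × Int)) (n : Nat), before.length + rest.length = n + 1 →
      stackMeas (mkChildren e br before rest) ≤ 2 * rest.length * gMeas n := by
  intro rest
  induction rest with
  | nil => intro before n _; simp [mkChildren, stackMeas]
  | cons p after ih =>
    intro before n h
    have hn : before.length + after.length = n := by simp at h; omega
    have ht := ih (before ++ [p]) n (by simp; omega)
    have hbranch : stackMeas ((if p.1 == e then [(p.2, before ++ after, br ++ [p])] else []) ++
        (if p.2 == e then [(p.1, before ++ after, br ++ [p])] else [])) ≤ 2 * gMeas n := by
      split_ifs <;> simp [stackMeas, hn] <;> omega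
    calc stackMeas (mkChildren e br before (p :: after))
        = stackMeas ((if p.1 == e then [(p.2, before ++ after, br ++ [p])] else []) ++
            (if p.2 == e then [(p.1, before ++ after, br ++ [p])] else [])) +
          stackMeas (mkChildren e br (before ++ [p]) after) := by
          rw [mkChildren, List.append_assoc, stackMeas_append, stackMeas_append,
            stackMeas_append]; omega
      _ ≤ 2 * gMeas n + 2 * after.length * gMeas n := Nat.add_le_add hbranch ht
      _ = 2 * (p :: after).length * gMeas n := by simp [List.length_cons]; ring

def fbRun (stack : List (Int × List (Int × Int) × List (Int × Int))) : List (List (Int × Int)) :=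
  match stack with
  | [] => []
  | (e, ps, br) :: rest =>
    let ch := mkChildren e br [] ps
    if h : ch = [] then br :: fbRun rest
    else fbRun (ch ++ rest)
termination_by stackMeas stack
decreasing_by
  · have := gMeas_pos ps.length
    simp [stackMeas]; omega
  · rw [stackMeas_append]
    simp only [stackMeas, List.map_cons, List.sum_cons]
    cases hps : ps with
    | nil => subst hps; exact absurd rfl h
    | cons q qs =>
      subst hps
      have hch := mkChildren_meas e br (q :: qs) [] qs.length (by simp)
      simp only [stackMeas, List.length_cons] at hch ⊢
      have hg : gMeas (qs.length + 1) = 2 * (qs.length + 1) * gMeas qs.length + 1 := rfl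
      omega

def find_bridges_alt (end_ : Int) (ports : List (Int × Int)) (bridge : List (Int × Int)) : List (List (Int × Int)) :=
  fbRun [(end_, ports, bridge)]

-- ===== PRECONDITION & SPEC =====
def Spec_find_bridges (end_ : Int) (ports : List (Int × Int)) (bridge : List (Int × Int)) (out : List (List (Int × Int))) : Prop := out = find_bridges_alt end_ ports bridge
instance (end_ : Int) (ports : List (Int × Int)) (bridge : List (Int × Int)) (out : List (List (Int × Int))) : Decidable (Spec_find_bridges end_ ports bridge out) := by unfold Spec_find_bridges; infer_instance

-- ===== CLAIM (what is proved, stated in full; the proofs are below) =====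
def Claim_equal_find_bridges : Prop := ∀ (end_ : Int) (ports : List (Int × Int)) (bridge : List (Int × Int)), Dom_find_bridges end_ ports bridge → Spec_find_bridges end_ ports bridge (find_bridges end_ ports bridge)

-- ===== LEMMAS AND PROOFS =====
-- A's inner loop equals: (some child exists, concatenation of recursive results over B's children)
theorem fbLoop_eq_children (end_ : Int) (bridge : List (Int × Int)) :
    ∀ (rest before : List (Int × Int)),
      fbLoop end_ bridge before rest =
        (!(mkChildren end_ bridge before rest).isEmpty,
         (mkChildren end_ bridge before rest).flatMap (fun f => find_bridges f.1 f.2.1 f.2.2)) := by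
  intro rest
  induction rest with
  | nil => intro before; simp [fbLoop, mkChildren]
  | cons p after ih =>
    intro before
    rw [fbLoop, mkChildren, ih (before ++ [p])]
    split_ifs <;> simp_all

theorem fbRun_eq_flatMap (stack : List (Int × List (Int × Int) × List (Int × Int))) :
    fbRun stack = stack.flatMap (fun f => find_bridges f.1 f.2.1 f.2.2) := by
  fun_induction fbRun with
  | case1 => simp
  | case2 e ps br rest ch h ih =>
    rw [List.flatMap_cons, ← ih]
    rw [find_bridges, fbLoop_eq_children]
    simp [h, ch]
  | case3 e ps br rest ch h ih =>
    rw [ih, List.flatMap_append, List.flatMap_cons]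
    rw [find_bridges, fbLoop_eq_children]
    simp [h, ch]

-- ===== VERDICT (by name: the statement is the Claim_ definition above) =====
theorem find_bridges_spec : Claim_equal_find_bridges := by
  intro end_ ports bridge _
  unfold Spec_find_bridges find_bridges_alt
  rw [fbRun_eq_flatMap]
  simp
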